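-- pv_equiv track=rewrite | github.com/ThejanB/Project-Euler | 205 hackerrank.py | compute_wins
-- ===== SOURCE A (Python) =====
-- mod = 1012924417
--
-- def compute_distribution(A, a):
--     """Computes the probability distribution of sums using dynamic programming."""
--     max_sum = A * a
--     dp = [0] * (max_sum + 1)
--     dp[0] = 1  # Base case: one way to make sum 0 with zero elements
--
--     # Compute frequencies using dynamic programming
--     for _ in range(A):
--         new_dp = [0] * (max_sum + 1)
--         for cur_sum in range(max_sum + 1):
--             if dp[cur_sum] > 0:
--                 for num in range(1, a + 1):
--                     new_dp[cur_sum + num] += dp[cur_sum]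
--         dp = new_dp
--
--     return dp
--
-- def compute_wins(A, a, B, b):
--     """Computes the probability of A winning over B using DP and prefix sums."""
--     x_list = compute_distribution(A, a)
--     y_list = compute_distribution(B, b)
--
--     max_x = len(x_list)
--     max_y = len(y_list)
--
--     # Compute prefix sums for y_list
--     prefix_y = [0] * max_y
--     prefix_y[0] = y_list[0]
--     for i in range(1, max_y):
--         prefix_y[i] = prefix_y[i - 1] + y_list[i]
--
--     wins = 0
--     total_x = sum(x_list)
--     total_y = sum(y_list)
--
--     for x_val in range(max_x):
--         if x_list[x_val] > 0:
--             wins += x_list[x_val] * (prefix_y[min(x_val - 1, max_y - 1)] if x_val > 0 else 0)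
--
--     # Compute modular inverse of total cases
--     total_cases = total_x * total_y
--     mod_inverse = pow(total_cases, mod - 2, mod)
--
--     return (wins * mod_inverse) % mod
-- ===== SOURCE B (Python) =====
-- mod = 1012924417
--
-- def _distribution(A, a):
--     """Sum distribution via sliding-window DP: each round in O(A*a) instead of O(A*a*a)."""
--     m = A * a
--     dp = [0] * (m + 1)
--     dp[0] = 1
--     for _ in range(A):
--         new = []
--         w = 0  # running window sum dp[t-a .. t-1]
--         for t in range(m + 1):
--             if t >= 1:
--                 w += dp[t - 1]
--             if t - a >= 1:
--                 w -= dp[t - a - 1]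
--             new.append(w)
--         dp = new
--     return dp
--
-- def compute_wins(A, a, B, b):
--     xs = _distribution(A, a)
--     ys = _distribution(B, b)
--     wins = 0
--     cum = 0  # sum of ys[0 .. i-1], capped at len(ys)
--     for i in range(len(xs)):
--         if 1 <= i <= len(ys):
--             cum += ys[i - 1]
--         wins += xs[i] * cum
--     total_cases = sum(xs) * sum(ys)
--     return wins * pow(total_cases, mod - 2, mod) % mod
-- ===== Notes on version B (the rewrite author's own statement) =====
-- stated objective: faster
-- what changed: Each DP round is computed with a sliding-window running sum (add dp[t-1], drop dp[t-a-1]) instead of A's inner loop over all a face values, and the win count keeps one running cumulative sum of the opponent distribution instead of building and indexing a prefix-sum array.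
import Mathlib
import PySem

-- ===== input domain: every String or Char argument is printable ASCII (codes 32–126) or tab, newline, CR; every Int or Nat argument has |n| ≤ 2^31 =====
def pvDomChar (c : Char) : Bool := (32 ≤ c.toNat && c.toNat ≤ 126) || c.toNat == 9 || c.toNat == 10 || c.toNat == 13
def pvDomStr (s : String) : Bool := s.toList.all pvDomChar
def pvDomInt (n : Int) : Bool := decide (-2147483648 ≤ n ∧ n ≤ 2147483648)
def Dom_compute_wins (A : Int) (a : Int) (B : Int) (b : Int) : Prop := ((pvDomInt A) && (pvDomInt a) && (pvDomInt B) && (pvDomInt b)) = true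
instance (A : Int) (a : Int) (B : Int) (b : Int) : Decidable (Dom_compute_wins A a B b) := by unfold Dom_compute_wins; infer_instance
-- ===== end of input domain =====

-- B replaces A's inner loop over the a face values by a sliding-window running sum
-- (one pass per DP round instead of an inner loop per cell), and the win count by a
-- single running cumulative sum instead of a prefix-sum array.

def pvMod : Int := 1012924417

-- Python's three-argument pow(b, e, m): square-and-multiply modular exponentiation,
-- used by both ports. (Value-equal to PySem.Int.powMod = (b^e) % m, but that
-- definition materialises b^e, which is not evaluable for e ≈ 10^9.)
def pyPowMod (b : Int) (e : Nat) (m : Int) : Int :=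
  if _he : e = 0 then PySem.Int.mod 1 m
  else
    let h := pyPowMod b (e / 2) m
    if e % 2 = 0 then PySem.Int.mod (h * h) m
    else PySem.Int.mod (PySem.Int.mod (h * h) m * PySem.Int.mod b m) m
termination_by e
decreasing_by exact Nat.div_lt_self (Nat.pos_of_ne_zero _he) (by norm_num)

-- ===== PORT A =====
-- `new_dp[cur+num] += dp[cur]` : pySetD/pyGetD; on the inputs admitted by Pre_ the
-- index is always in range (nonzero dp entries never exceed the round's reach),
-- where pySetD is exact Python list assignment.
def distA_inner (dp : List Int) (a cur : Int) (new_dp : List Int) : List Int :=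
  (PySem.List.pyRange 1 (a + 1)).foldl (fun nd num =>
    PySem.List.pySetD nd (cur + num)
      (PySem.List.pyGetD nd (cur + num) 0 + PySem.List.pyGetD dp cur 0)) new_dp

-- one iteration of A's `for _ in range(A)` loop (the body of compute_distribution)
def distA_step (a maxSum : Int) (dp : List Int) : List Int :=
  (PySem.List.pyRange 0 (maxSum + 1)).foldl (fun new_dp cur_sum =>
    if PySem.List.pyGetD dp cur_sum 0 > 0 then distA_inner dp a cur_sum new_dp
    else new_dp) (List.replicate (maxSum + 1).toNat 0)

-- A's compute_distribution; `dp = [0]*(max_sum+1); dp[0] = 1` (Python raises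
-- IndexError when max_sum < 0 — those inputs are excluded by Pre_)
def compute_distribution (A a : Int) : List Int :=
  (PySem.List.pyRange 0 A).foldl (fun dp _ => distA_step a (A * a) dp)
    (PySem.List.pySetD (List.replicate (A * a + 1).toNat (0 : Int)) 0 1)

def compute_wins (A : Int) (a : Int) (B : Int) (b : Int) : Int :=
  let x_list := compute_distribution A a
  let y_list := compute_distribution B b
  let max_x : Int := x_list.length
  let max_y : Int := y_list.length
  let prefix_y0 := PySem.List.pySetD (List.replicate max_y.toNat (0 : Int)) 0
      (PySem.List.pyGetD y_list 0 0)
  let prefix_y := (PySem.List.pyRange 1 max_y).foldl (fun p i =>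
      PySem.List.pySetD p i
        (PySem.List.pyGetD p (i - 1) 0 + PySem.List.pyGetD y_list i 0)) prefix_y0
  let wins := (PySem.List.pyRange 0 max_x).foldl (fun w x_val =>
      if PySem.List.pyGetD x_list x_val 0 > 0 then
        w + PySem.List.pyGetD x_list x_val 0 *
          (if x_val > 0 then PySem.List.pyGetD prefix_y (min (x_val - 1) (max_y - 1)) 0 else 0)
      else w) 0
  let total_x := x_list.sum
  let total_y := y_list.sum
  let total_cases := total_x * total_y
  let mod_inverse := pyPowMod total_cases (pvMod - 2).toNat pvMod
  PySem.Int.mod (wins * mod_inverse) pvMod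

-- ===== PORT B =====
-- one iteration of B's round loop: sliding-window running sum w = dp[t-a] + … + dp[t-1]
def distB_step (a m : Int) (dp : List Int) : List Int :=
  ((PySem.List.pyRange 0 (m + 1)).foldl (fun (st : List Int × Int) t =>
      let w1 := if 1 ≤ t then st.2 + PySem.List.pyGetD dp (t - 1) 0 else st.2
      let w2 := if 1 ≤ t - a then w1 - PySem.List.pyGetD dp (t - a - 1) 0 else w1
      (st.1 ++ [w2], w2)) ([], 0)).1

def distribution_alt (A a : Int) : List Int :=
  (PySem.List.pyRange 0 A).foldl (fun dp _ => distB_step a (A * a) dp)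
    (PySem.List.pySetD (List.replicate (A * a + 1).toNat (0 : Int)) 0 1)

def compute_wins_alt (A : Int) (a : Int) (B : Int) (b : Int) : Int :=
  let xs := distribution_alt A a
  let ys := distribution_alt B b
  let r := (PySem.List.pyRange 0 (xs.length : Int)).foldl (fun (st : Int × Int) i =>
      let cum := if 1 ≤ i ∧ i ≤ (ys.length : Int) then st.2 + PySem.List.pyGetD ys (i - 1) 0
                 else st.2
      (st.1 + PySem.List.pyGetD xs i 0 * cum, cum)) (0, 0)
  let total_cases := xs.sum * ys.sum
  PySem.Int.mod (r.1 * pyPowMod total_cases (pvMod - 2).toNat pvMod) pvMod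

-- ===== PRECONDITION & SPEC =====
-- Pre_ excludes exactly the inputs on which Python A raises IndexError: whenever
-- A*a < 0 or B*b < 0, `dp = [0]*(max_sum+1)` is empty and `dp[0] = 1` raises.
def Pre_compute_wins (A : Int) (a : Int) (B : Int) (b : Int) : Prop :=
  0 ≤ A * a ∧ 0 ≤ B * b
instance (A : Int) (a : Int) (B : Int) (b : Int) : Decidable (Pre_compute_wins A a B b) := by
  unfold Pre_compute_wins; infer_instance

def pvWitness_compute_wins : Int × Int × Int × Int := (2, 3, 1, 4)

def Spec_compute_wins (A : Int) (a : Int) (B : Int) (b : Int) (out : Int) : Prop := out = compute_wins_alt A a B b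
instance (A : Int) (a : Int) (B : Int) (b : Int) (out : Int) : Decidable (Spec_compute_wins A a B b out) := by unfold Spec_compute_wins; infer_instance

-- ===== CLAIM (what is proved, stated in full; the proofs are below) =====
def Claim_equal_compute_wins : Prop := ∀ (A : Int) (a : Int) (B : Int) (b : Int), Dom_compute_wins A a B b → Pre_compute_wins A a B b → Spec_compute_wins A a B b (compute_wins A a B b)

-- ===== LEMMAS AND PROOFS =====

-- partial sums: pvS dp n = dp[0] + … + dp[n-1]
def pvS (dp : List Int) (n : Nat) : Int := ∑ j ∈ Finset.range n, dp.getD j 0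
-- window sum: pvW dp a' t = dp[t-a'] + … + dp[t-1]  (lower end clamped at 0)
def pvW (dp : List Int) (a' t : Nat) : Int := ∑ j ∈ Finset.Ico (t - a') t, dp.getD j 0
-- partial window sum: only the contributions of the cur-values below c
def pvPS (dp : List Int) (a' c t : Nat) : Int :=
  ∑ j ∈ Finset.range c, (if t - a' ≤ j ∧ j < t then dp.getD j 0 else 0)

lemma pySetD_oob {α : Type} (xs : List α) (n : Nat) (v : α) (h : xs.length ≤ n) :
    PySem.List.pySetD xs (↑n) v = xs := by
  simp [PySem.List.pySetD, PySem.List.pySet?, PySem.List.pyIdx?]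
  rw [if_neg (by omega)]
  rfl

-- A's inner `for num in range(1, a+1)` loop adds v once at each index cur+1 … cur+a'
lemma innerA_aux (nd : List Int) (v : Int) (cur : Nat) (a' : Nat) :
    ((PySem.List.pyRange 1 ((a' : Int) + 1)).foldl (fun nd2 num =>
      PySem.List.pySetD nd2 ((cur : Int) + num)
        (PySem.List.pyGetD nd2 ((cur : Int) + num) 0 + v)) nd).length = nd.length ∧
    ∀ t : Nat, ((PySem.List.pyRange 1 ((a' : Int) + 1)).foldl (fun nd2 num =>
      PySem.List.pySetD nd2 ((cur : Int) + num)
        (PySem.List.pyGetD nd2 ((cur : Int) + num) 0 + v)) nd).getD t 0 =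
      nd.getD t 0 + (if cur + 1 ≤ t ∧ t ≤ cur + a' ∧ t < nd.length then v else 0) := by
  induction a' with
  | zero =>
    rw [Nat.cast_zero, zero_add, PySem.List.pyRange_one_eq_nil le_rfl]
    refine ⟨rfl, fun t => ?_⟩
    rw [if_neg (by omega)]
    simp
  | succ n ih =>
    rw [Nat.cast_succ, PySem.List.pyRange_one_succ_right (by omega), List.foldl_append,
      List.foldl_cons, List.foldl_nil]
    have hidx : (cur : Int) + ((n : Int) + 1) = ((cur + n + 1 : Nat) : Int) := by push_cast; ring
    rw [hidx]
    obtain ⟨ihlen, ihget⟩ := ih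
    set R := (PySem.List.pyRange 1 ((n : Int) + 1)).foldl (fun nd2 num =>
      PySem.List.pySetD nd2 ((cur : Int) + num)
        (PySem.List.pyGetD nd2 ((cur : Int) + num) 0 + v)) nd with hR
    by_cases hn : cur + n + 1 < nd.length
    · constructor
      · rw [PySem.List.length_pySetD, ihlen]
      · intro t
        rw [← PySem.List.pyGetD_natCast,
          PySem.List.pyGetD_pySetD_natCast R (cur + n + 1) t _ _ (by rw [ihlen]; exact hn)]
        by_cases ht : t = cur + n + 1
        · subst ht
          rw [if_pos rfl, PySem.List.pyGetD_natCast, ihget, if_neg (by omega),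
            if_pos (by omega)]
          ring
        · rw [if_neg ht, PySem.List.pyGetD_natCast, ihget]
          by_cases hc : cur + 1 ≤ t ∧ t ≤ cur + n ∧ t < nd.length
          · rw [if_pos hc, if_pos (by omega)]
          · rw [if_neg hc, if_neg (by omega)]
    · rw [pySetD_oob R (cur + n + 1) _ (by omega)]
      refine ⟨ihlen, fun t => ?_⟩
      rw [ihget]
      by_cases hc : cur + 1 ≤ t ∧ t ≤ cur + n ∧ t < nd.length
      · rw [if_pos hc, if_pos (by omega)]
      · rw [if_neg hc, if_neg (by omega)]

lemma distA_inner_spec (dp nd : List Int) (a' cur : Nat) :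
    (distA_inner dp (↑a') (↑cur) nd).length = nd.length ∧
    ∀ t : Nat, (distA_inner dp (↑a') (↑cur) nd).getD t 0 =
      nd.getD t 0 + (if cur + 1 ≤ t ∧ t ≤ cur + a' ∧ t < nd.length
                     then PySem.List.pyGetD dp (↑cur) 0 else 0) := by
  unfold distA_inner
  exact innerA_aux nd (PySem.List.pyGetD dp (↑cur) 0) cur a'

-- invariant of A's `for cur_sum in range(max_sum+1)` loop
lemma distA_step_inv (dp : List Int) (a' : Nat) (hnn : ∀ j : Nat, 0 ≤ dp.getD j 0) (L : Nat) :
    ∀ c : Nat,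
      ((PySem.List.pyRange 0 (↑c)).foldl (fun new_dp cur_sum =>
        if PySem.List.pyGetD dp cur_sum 0 > 0 then distA_inner dp (↑a') cur_sum new_dp
        else new_dp) (List.replicate L 0)).length = L ∧
      ∀ t : Nat, t < L →
      ((PySem.List.pyRange 0 (↑c)).foldl (fun new_dp cur_sum =>
        if PySem.List.pyGetD dp cur_sum 0 > 0 then distA_inner dp (↑a') cur_sum new_dp
        else new_dp) (List.replicate L 0)).getD t 0 = pvPS dp a' c t := by
  intro c
  induction c with
  | zero =>
    rw [Nat.cast_zero, PySem.List.pyRange_one_eq_nil le_rfl]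
    refine ⟨by simp, fun t ht => ?_⟩
    simp [pvPS]
  | succ n ih =>
    rw [Nat.cast_succ, PySem.List.pyRange_one_succ_right (by positivity), List.foldl_append,
      List.foldl_cons, List.foldl_nil]
    obtain ⟨ihlen, ihget⟩ := ih
    set R := (PySem.List.pyRange 0 (↑n)).foldl (fun new_dp cur_sum =>
        if PySem.List.pyGetD dp cur_sum 0 > 0 then distA_inner dp (↑a') cur_sum new_dp
        else new_dp) (List.replicate L 0) with hR
    have hstep : ∀ t : Nat, t < L →
        pvPS dp a' (n + 1) t =
          pvPS dp a' n t + (if t - a' ≤ n ∧ n < t then dp.getD n 0 else 0) := by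
      intro t ht
      unfold pvPS
      rw [Finset.sum_range_succ]
    by_cases hg : PySem.List.pyGetD dp (↑n : Int) 0 > 0
    · rw [if_pos hg]
      obtain ⟨ilen, iget⟩ := distA_inner_spec dp R a' n
      refine ⟨by rw [ilen, ihlen], fun t ht => ?_⟩
      rw [iget, ihget t ht, hstep t ht, PySem.List.pyGetD_natCast]
      by_cases hc : t - a' ≤ n ∧ n < t
      · rw [if_pos (by omega : n + 1 ≤ t ∧ t ≤ n + a' ∧ t < R.length), if_pos hc]
      · rw [if_neg (by rw [ihlen]; omega), if_neg hc]
    · rw [if_neg hg]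
      refine ⟨ihlen, fun t ht => ?_⟩
      rw [ihget t ht, hstep t ht]
      have hz : dp.getD n 0 = 0 := by
        rw [PySem.List.pyGetD_natCast] at hg
        have := hnn n
        omega
      rw [hz]
      simp

lemma pvPS_eq_pvW (dp : List Int) (a' t L : Nat) (h : t ≤ L) :
    pvPS dp a' L t = pvW dp a' t := by
  unfold pvPS pvW
  rw [← Finset.sum_filter]
  apply Finset.sum_congr _ (fun _ _ => rfl)
  ext j
  simp only [Finset.mem_filter, Finset.mem_range, Finset.mem_Ico]
  omega

lemma pvW_succ (dp : List Int) (a' t : Nat) :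
    pvW dp a' (t + 1) =
      pvW dp a' t + dp.getD t 0 - (if a' ≤ t then dp.getD (t - a') 0 else 0) := by
  unfold pvW
  rw [Finset.sum_Ico_eq_sub _ (by omega), Finset.sum_Ico_eq_sub _ (by omega)]
  by_cases hat : a' ≤ t
  · have h1 : t + 1 - a' = (t - a') + 1 := by omega
    rw [h1, Finset.sum_range_succ, Finset.sum_range_succ, if_pos hat]
    ring
  · have h1 : t + 1 - a' = 0 := by omega
    have h2 : t - a' = 0 := by omega
    rw [h1, h2, Finset.sum_range_succ, if_neg hat]
    ring

-- invariant of B's sliding-window loop: the produced list is the window sums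
lemma distB_inv (dp : List Int) (a' : Nat) :
    ∀ c : Nat,
      (PySem.List.pyRange 0 (↑c)).foldl (fun (st : List Int × Int) t =>
        let w1 := if 1 ≤ t then st.2 + PySem.List.pyGetD dp (t - 1) 0 else st.2
        let w2 := if 1 ≤ t - (↑a' : Int) then w1 - PySem.List.pyGetD dp (t - (↑a' : Int) - 1) 0 else w1
        (st.1 ++ [w2], w2)) ([], 0) =
      ((List.range c).map (fun t => pvW dp a' t), pvW dp a' (c - 1)) := by
  intro c
  induction c with
  | zero =>
    rw [Nat.cast_zero, PySem.List.pyRange_one_eq_nil le_rfl]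
    simp [pvW]
  | succ n ih =>
    rw [Nat.cast_succ, PySem.List.pyRange_one_succ_right (by positivity), List.foldl_append,
      List.foldl_cons, List.foldl_nil, ih]
    dsimp only
    have hw : (if 1 ≤ (n : Int) - (↑a' : Int) then
        (if 1 ≤ (n : Int) then pvW dp a' (n - 1) + PySem.List.pyGetD dp ((n : Int) - 1) 0
         else pvW dp a' (n - 1)) - PySem.List.pyGetD dp ((n : Int) - (↑a' : Int) - 1) 0
      else (if 1 ≤ (n : Int) then pvW dp a' (n - 1) + PySem.List.pyGetD dp ((n : Int) - 1) 0
            else pvW dp a' (n - 1))) = pvW dp a' n := by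
      cases n with
      | zero =>
        rw [if_neg (by omega), if_neg (by omega)]
      | succ k =>
        rw [if_pos (show (1:Int) ≤ ((k+1 : Nat) : Int) by push_cast; omega)]
        have h1 : ((k + 1 : Nat) : Int) - 1 = ((k : Nat) : Int) := by push_cast; ring
        have hkk : (k + 1) - 1 = k := rfl
        rw [h1, PySem.List.pyGetD_natCast, hkk, pvW_succ]
        by_cases hak : a' ≤ k
        · rw [if_pos (show (1:Int) ≤ ((k+1 : Nat) : Int) - (↑a' : Int) by push_cast; omega)]
          have h2 : ((k + 1 : Nat) : Int) - (↑a' : Int) - 1 = ((k - a' : Nat) : Int) := by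
            push_cast [hak]; ring
          rw [h2, PySem.List.pyGetD_natCast, if_pos hak]
        · rw [if_neg (show ¬ (1:Int) ≤ ((k+1 : Nat) : Int) - (↑a' : Int) by push_cast; omega),
            if_neg hak]
          ring
    rw [hw]
    rw [List.range_succ, List.map_append, List.map_cons, List.map_nil]
    simp

-- one round of A equals one round of B (both are the window sums of the old row)
lemma step_eq (a m : Int) (ha : 0 ≤ a) (hm : 0 ≤ m) (dp : List Int)
    (hnn : ∀ j : Nat, 0 ≤ dp.getD j 0) :
    distA_step a m dp = distB_step a m dp ∧
    (distA_step a m dp).length = (m + 1).toNat ∧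
    (∀ j : Nat, 0 ≤ (distA_step a m dp).getD j 0) := by
  set L := (m + 1).toNat with hLdef
  have hL : ((L : Nat) : Int) = m + 1 := Int.toNat_of_nonneg (by omega)
  have hac : ((a.toNat : Nat) : Int) = a := Int.toNat_of_nonneg ha
  obtain ⟨alen, aget⟩ := distA_step_inv dp a.toNat hnn L L
  have hA : distA_step a m dp =
      (PySem.List.pyRange 0 ((L : Nat) : Int)).foldl (fun new_dp cur_sum =>
        if PySem.List.pyGetD dp cur_sum 0 > 0 then distA_inner dp (↑a.toNat) cur_sum new_dp
        else new_dp) (List.replicate L 0) := by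
    unfold distA_step
    rw [hL, hac, hLdef]
  have hB : distB_step a m dp = (List.range L).map (fun t => pvW dp a.toNat t) := by
    unfold distB_step
    rw [← hL, ← hac, distB_inv dp a.toNat L]
    simp only [List.map_inj_left]
    intro k _
    congr 1
  have hmain : distA_step a m dp = (List.range L).map (fun t => pvW dp a.toNat t) := by
    rw [hA]
    apply List.ext_getElem
    · rw [alen]; simp
    · intro i h1 h2
      rw [← List.getD_eq_getElem _ 0 h1, ← List.getD_eq_getElem _ 0 h2]
      have hiL : i < L := by rw [← alen]; exact h1
      rw [aget i hiL, pvPS_eq_pvW dp a.toNat i L (by omega)]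
      rw [List.getD_eq_getElem _ 0 h2, List.getElem_map, List.getElem_range]
  refine ⟨by rw [hmain, ← hB], by rw [hA] at hmain ⊢; rw [hmain]; simp, ?_⟩
  intro j
  rw [hmain]
  by_cases hj : j < L
  · rw [List.getD_eq_getElem _ 0 (by simpa using hj), List.getElem_map, List.getElem_range]
    exact Finset.sum_nonneg (fun k _ => hnn k)
  · rw [List.getD_eq_default _ 0 (by simpa using hj)]

-- a repeated loop body may be replaced by an equal one along an invariant
lemma foldl_const_eq_of_inv {α : Type} (f g : List Int → List Int) (P : List Int → Prop)
    (hf : ∀ dp, P dp → f dp = g dp ∧ P (f dp)) :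
    ∀ (l : List α) (dp), P dp →
      l.foldl (fun d _ => f d) dp = l.foldl (fun d _ => g d) dp ∧
      P (l.foldl (fun d _ => f d) dp) := by
  intro l
  induction l with
  | nil => intro dp h; exact ⟨rfl, h⟩
  | cons hd tl ih =>
    intro dp h
    obtain ⟨heq, hP⟩ := hf dp h
    simp only [List.foldl_cons]
    rw [← heq]
    exact ih (f dp) hP

lemma dp0_getD (L : Nat) (hL : 1 ≤ L) (j : Nat) :
    (PySem.List.pySetD (List.replicate L (0 : Int)) 0 1).getD j 0 =
      if j = 0 then 1 else 0 := by
  rw [← PySem.List.pyGetD_natCast]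
  rw [show ((0 : Int)) = ((0 : Nat) : Int) by norm_num] at *
  rw [PySem.List.pyGetD_pySetD_natCast _ 0 j _ _ (by simpa using hL),
    PySem.List.pyGetD_natCast]
  by_cases hj : j = 0
  · rw [if_pos hj, if_pos hj]
  · rw [if_neg hj, if_neg hj]
    by_cases hjL : j < L
    · rw [List.getD_replicate _ hjL]
    · rw [List.getD_eq_default _ _ (by simpa using hjL)]

-- the two distribution routines agree, and the result has known length and is nonnegative
lemma dist_eq (A a : Int) (h : 0 ≤ A * a) :
    compute_distribution A a = distribution_alt A a ∧
    (compute_distribution A a).length = (A * a + 1).toNat ∧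
    (∀ j : Nat, 0 ≤ (compute_distribution A a).getD j 0) := by
  set L := (A * a + 1).toNat with hLdef
  have hL1 : 1 ≤ L := by omega
  have hlen0 : (PySem.List.pySetD (List.replicate L (0 : Int)) 0 1).length = L := by
    rw [PySem.List.length_pySetD, List.length_replicate]
  have hnn0 : ∀ j : Nat, 0 ≤ (PySem.List.pySetD (List.replicate L (0 : Int)) 0 1).getD j 0 := by
    intro j
    rw [dp0_getD L hL1 j]
    split <;> omega
  by_cases hA : A ≤ 0
  · unfold compute_distribution distribution_alt
    rw [PySem.List.pyRange_one_eq_nil hA, List.foldl_nil]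
    exact ⟨rfl, hlen0, hnn0⟩
  · have ha : 0 ≤ a := by
      by_contra hneg
      have : A * a < 0 := mul_neg_of_pos_of_neg (by omega) (by omega)
      omega
    have key := foldl_const_eq_of_inv (distA_step a (A * a)) (distB_step a (A * a))
      (fun dp => dp.length = L ∧ ∀ j : Nat, 0 ≤ dp.getD j 0)
      (fun dp hP => by
        obtain ⟨heq, hlen, hnn⟩ := step_eq a (A * a) ha h dp hP.2
        exact ⟨heq, hlen, hnn⟩)
      (PySem.List.pyRange 0 A)
      (PySem.List.pySetD (List.replicate L (0 : Int)) 0 1)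
      ⟨hlen0, hnn0⟩
    exact ⟨key.1, key.2.1, key.2.2⟩

-- A's prefix_y loop: prefix_y[j] = y[0] + … + y[j] once the loop has passed j
lemma prefix_inv (y : List Int) (hly : 1 ≤ y.length) :
    ∀ k : Nat, 1 + k ≤ y.length →
      ((PySem.List.pyRange 1 (↑(1 + k))).foldl (fun p i =>
        PySem.List.pySetD p i
          (PySem.List.pyGetD p (i - 1) 0 + PySem.List.pyGetD y i 0))
        (PySem.List.pySetD (List.replicate y.length (0 : Int)) 0
          (PySem.List.pyGetD y 0 0))).length = y.length ∧
      ∀ j : Nat, j < y.length →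
      ((PySem.List.pyRange 1 (↑(1 + k))).foldl (fun p i =>
        PySem.List.pySetD p i
          (PySem.List.pyGetD p (i - 1) 0 + PySem.List.pyGetD y i 0))
        (PySem.List.pySetD (List.replicate y.length (0 : Int)) 0
          (PySem.List.pyGetD y 0 0))).getD j 0 = if j < 1 + k then pvS y (j + 1) else 0 := by
  intro k
  induction k with
  | zero =>
    intro _
    rw [show ((1 + 0 : Nat) : Int) = 1 by norm_num, PySem.List.pyRange_one_eq_nil le_rfl,
      List.foldl_nil]
    constructor
    · rw [PySem.List.length_pySetD, List.length_replicate]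
    · intro j hj
      rw [← PySem.List.pyGetD_natCast,
        show ((0 : Int)) = ((0 : Nat) : Int) by norm_num,
        PySem.List.pyGetD_pySetD_natCast _ 0 j _ _ (by simpa using hly),
        PySem.List.pyGetD_natCast, PySem.List.pyGetD_natCast]
      by_cases hj0 : j = 0
      · subst hj0
        rw [if_pos rfl, if_pos (by omega)]
        unfold pvS
        rw [Finset.sum_range_one]
        norm_num
      · rw [if_neg hj0, if_neg (by omega), List.getD_replicate _ hj]
  | succ n ih =>
    intro hk
    have ihh := ih (by omega)
    obtain ⟨ihlen, ihget⟩ := ihh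
    rw [show ((1 + (n + 1) : Nat) : Int) = ((1 + n : Nat) : Int) + 1 by push_cast; ring,
      PySem.List.pyRange_one_succ_right (by push_cast; omega), List.foldl_append,
      List.foldl_cons, List.foldl_nil]
    set R := ((PySem.List.pyRange 1 (↑(1 + n))).foldl (fun p i =>
        PySem.List.pySetD p i
          (PySem.List.pyGetD p (i - 1) 0 + PySem.List.pyGetD y i 0))
        (PySem.List.pySetD (List.replicate y.length (0 : Int)) 0
          (PySem.List.pyGetD y 0 0))) with hR
    have hidx : ((1 + n : Nat) : Int) - 1 = ((n : Nat) : Int) := by push_cast; ring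
    have hval : PySem.List.pyGetD R (((1 + n : Nat) : Int) - 1) 0 + PySem.List.pyGetD y ((1 + n : Nat) : Int) 0
        = pvS y (1 + n + 1) := by
      rw [hidx, PySem.List.pyGetD_natCast, PySem.List.pyGetD_natCast,
        ihget n (by omega), if_pos (by omega), Nat.add_comm n 1]
      unfold pvS
      rw [Finset.sum_range_succ]
    rw [hval]
    constructor
    · rw [PySem.List.length_pySetD, ihlen]
    · intro j hj
      rw [← PySem.List.pyGetD_natCast,
        PySem.List.pyGetD_pySetD_natCast R (1 + n) j _ _ (by rw [ihlen]; omega),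
        PySem.List.pyGetD_natCast]
      by_cases hj1 : j = 1 + n
      · rw [if_pos hj1, if_pos (by omega), hj1]
      · rw [if_neg hj1, ihget j hj]
        by_cases hj2 : j < 1 + n
        · rw [if_pos hj2, if_pos (by omega)]
        · rw [if_neg hj2, if_neg (by omega)]

-- A's win loop: its total is Σ_i x[i] · (y[0] + … + y[min(i,|y|)-1])
lemma winsA_inv (x y p : List Int) (hly : 1 ≤ y.length)
    (hx : ∀ j : Nat, 0 ≤ x.getD j 0)
    (hp : ∀ j : Nat, j < y.length → p.getD j 0 = pvS y (j + 1)) :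
    ∀ k : Nat,
      (PySem.List.pyRange 0 (↑k)).foldl (fun w x_val =>
        if PySem.List.pyGetD x x_val 0 > 0 then
          w + PySem.List.pyGetD x x_val 0 *
            (if x_val > 0 then PySem.List.pyGetD p (min (x_val - 1) ((y.length : Int) - 1)) 0 else 0)
        else w) 0 =
      ∑ i ∈ Finset.range k, x.getD i 0 * pvS y (min i y.length) := by
  intro k
  induction k with
  | zero =>
    rw [Nat.cast_zero, PySem.List.pyRange_one_eq_nil le_rfl, List.foldl_nil,
      Finset.sum_range_zero]
  | succ n ih =>
    rw [Nat.cast_succ, PySem.List.pyRange_one_succ_right (by positivity), List.foldl_append,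
      List.foldl_cons, List.foldl_nil, ih, Finset.sum_range_succ]
    have hterm : (if PySem.List.pyGetD x (↑n : Int) 0 > 0 then
        (∑ i ∈ Finset.range n, x.getD i 0 * pvS y (min i y.length)) + PySem.List.pyGetD x (↑n : Int) 0 *
          (if (↑n : Int) > 0 then PySem.List.pyGetD p (min ((↑n : Int) - 1) ((y.length : Int) - 1)) 0 else 0)
      else (∑ i ∈ Finset.range n, x.getD i 0 * pvS y (min i y.length))) =
      (∑ i ∈ Finset.range n, x.getD i 0 * pvS y (min i y.length)) + x.getD n 0 * pvS y (min n y.length) := by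
      rw [PySem.List.pyGetD_natCast]
      by_cases hg : x.getD n 0 > 0
      · rw [if_pos hg]
        cases n with
        | zero =>
          rw [if_neg (by omega)]
          unfold pvS
          simp
        | succ m =>
          rw [if_pos (by positivity)]
          have hmin : min (((m + 1 : Nat) : Int) - 1) ((y.length : Int) - 1)
              = ((min m (y.length - 1) : Nat) : Int) := by
            push_cast [Nat.cast_min]
            omega
          rw [hmin, PySem.List.pyGetD_natCast, hp _ (by omega),
            show min m (y.length - 1) + 1 = min (m + 1) y.length by omega]
      · rw [if_neg hg]
        have : x.getD n 0 = 0 := by have := hx n; omega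
        rw [this, zero_mul, add_zero]
    exact hterm

-- B's win loop computes the same total with a running cumulative sum
lemma winsB_inv (x y : List Int) :
    ∀ k : Nat,
      (PySem.List.pyRange 0 (↑k)).foldl (fun (st : Int × Int) i =>
        let cum := if 1 ≤ i ∧ i ≤ (y.length : Int) then st.2 + PySem.List.pyGetD y (i - 1) 0
                   else st.2
        (st.1 + PySem.List.pyGetD x i 0 * cum, cum)) (0, 0) =
      (∑ i ∈ Finset.range k, x.getD i 0 * pvS y (min i y.length), pvS y (min (k - 1) y.length)) := by
  intro k
  induction k with
  | zero =>
    rw [Nat.cast_zero, PySem.List.pyRange_one_eq_nil le_rfl, List.foldl_nil]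
    unfold pvS
    simp
  | succ n ih =>
    rw [Nat.cast_succ, PySem.List.pyRange_one_succ_right (by positivity), List.foldl_append,
      List.foldl_cons, List.foldl_nil, ih]
    dsimp only
    have hcum : (if 1 ≤ (↑n : Int) ∧ (↑n : Int) ≤ (y.length : Int)
        then pvS y (min (n - 1) y.length) + PySem.List.pyGetD y ((↑n : Int) - 1) 0
        else pvS y (min (n - 1) y.length)) = pvS y (min n y.length) := by
      by_cases hc : 1 ≤ (↑n : Int) ∧ (↑n : Int) ≤ (y.length : Int)
      · rw [if_pos hc]
        obtain ⟨h1, h2⟩ := hc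
        have hn1 : 1 ≤ n := by exact_mod_cast h1
        have hn2 : n ≤ y.length := by exact_mod_cast h2
        have hidx : ((↑n : Int) - 1) = ((n - 1 : Nat) : Int) := by push_cast [hn1]; ring
        rw [hidx, PySem.List.pyGetD_natCast,
          show min (n - 1) y.length = n - 1 by omega]
        unfold pvS
        rw [show min n y.length = (n - 1) + 1 by omega, Finset.sum_range_succ]
      · rw [if_neg hc]
        congr 1
        omega
    rw [hcum, PySem.List.pyGetD_natCast, Finset.sum_range_succ]
    simp

-- ===== VERDICT (by name: the statement is the Claim_ definition above) =====
theorem compute_wins_spec : Claim_equal_compute_wins := by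
  intro A a B b _hdom hpre
  obtain ⟨hxa, hyb⟩ := hpre
  obtain ⟨hxeq, hxlen, hxnn⟩ := dist_eq A a hxa
  obtain ⟨hyeq, hylen, hynn⟩ := dist_eq B b hyb
  unfold Spec_compute_wins compute_wins compute_wins_alt
  rw [← hxeq, ← hyeq]
  dsimp only
  set x := compute_distribution A a with hxdef
  set y := compute_distribution B b with hydef
  have hly : 1 ≤ y.length := by rw [hylen]; omega
  obtain ⟨plen, pget⟩ := prefix_inv y hly (y.length - 1) (by omega)
  rw [show 1 + (y.length - 1) = y.length by omega] at plen pget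
  have hp : ∀ j : Nat, j < y.length →
      ((PySem.List.pyRange 1 (↑y.length)).foldl (fun p i =>
        PySem.List.pySetD p i
          (PySem.List.pyGetD p (i - 1) 0 + PySem.List.pyGetD y i 0))
        (PySem.List.pySetD (List.replicate y.length (0 : Int)) 0
          (PySem.List.pyGetD y 0 0))).getD j 0 = pvS y (j + 1) := by
    intro j hj
    rw [pget j hj, if_pos (by omega)]
  have hAw := winsA_inv x y _ hly hxnn hp x.length
  have hBw := winsB_inv x y x.length
  rw [show ((y.length : Int)).toNat = y.length by simp]
  rw [hAw, hBw]
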